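-- pv_equiv track=rewrite | github.com/ja153903/start-thinking-more | advent_of_code/yr2015/day11/main.py | get_count_of_nonoverlapping_pairs
-- ===== SOURCE A (Python) =====
-- def get_count_of_nonoverlapping_pairs(password: str) -> int:
--     pairs = []
--
--     for i in range(len(password) - 1):
--         if password[i] == password[i + 1]:
--             pairs.append((i, i + 1, password[i]))
--
--     if not pairs:
--         return 0
--
--     pairs.sort(key=lambda t: t[0])
--
--     resulting_pairs = [pairs[0]]
--
--     for i in range(1, len(pairs)):
--         if pairs[i][0] < resulting_pairs[-1][1]:
--             continue
--
--         if resulting_pairs[-1][2] == pairs[i][2]: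
--             continue
--
--         resulting_pairs.append(pairs[i])
--
--     return len(resulting_pairs)
-- ===== SOURCE B (Python) =====
-- def get_count_of_nonoverlapping_pairs(password: str) -> int:
--     # Run-length encode the password, keep letters of runs of length >= 2,
--     # then count them after collapsing consecutive equal letters.
--     runs = []
--     for ch in password:
--         if runs and runs[-1][0] == ch:
--             runs[-1][1] += 1
--         else:
--             runs.append([ch, 1])
--
--     letters = [c for c, n in runs if n >= 2]
--
--     count = 0
--     prev = None
--     for c in letters:
--         if c != prev:
--             count += 1
--         prev = c
--     return count
-- ===== Notes on version B (the rewrite author's own statement) =====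
-- stated objective: alternative
-- what changed: Replaces the index-based pair scan with tuple list, sort and greedy overlap/letter filtering by a single-pass run-length encoding: keep the letter of each maximal run of length >= 2 and count those letters after collapsing consecutive duplicates.
import Mathlib
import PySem

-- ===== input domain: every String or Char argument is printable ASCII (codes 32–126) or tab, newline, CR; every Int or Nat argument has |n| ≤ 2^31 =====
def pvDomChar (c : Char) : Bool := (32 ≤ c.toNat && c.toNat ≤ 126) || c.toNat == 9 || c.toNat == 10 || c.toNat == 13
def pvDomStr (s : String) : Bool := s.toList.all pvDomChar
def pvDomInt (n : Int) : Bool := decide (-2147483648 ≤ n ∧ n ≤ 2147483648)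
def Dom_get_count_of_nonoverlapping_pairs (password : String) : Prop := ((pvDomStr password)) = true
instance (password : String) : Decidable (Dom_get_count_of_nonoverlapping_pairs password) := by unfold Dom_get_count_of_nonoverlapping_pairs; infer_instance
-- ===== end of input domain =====

-- B replaces A's pair scan + sort + greedy overlap/letter filter by a run-length encoding
-- of the string followed by counting run letters (runs of length ≥ 2) collapsed over
-- consecutive duplicates; same return value, alternative algorithm.

-- ===== PORT A =====
-- 'if password[i] == password[i+1]: pairs.append((i, i+1, password[i]))' (indices always in range)
def pvA_step (l : List Char) (acc : List (Int × Int × Char)) (i : Int) : List (Int × Int × Char) :=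
  if PySem.List.pyGetD l i ' ' = PySem.List.pyGetD l (i + 1) ' ' then
    acc ++ [(i, i + 1, PySem.List.pyGetD l i ' ')]
  else acc

-- the loop body over 'resulting_pairs'; the Lean list keeps resulting_pairs reversed
-- (head = Python's resulting_pairs[-1]); only its length is returned. '[]' is unreachable.
def pvA_greedyStep (res : List (Int × Int × Char)) (p : Int × Int × Char) : List (Int × Int × Char) :=
  match res with
  | q :: _ => if p.1 < q.2.1 then res else if q.2.2 = p.2.2 then res else p :: res
  | [] => res

def get_count_of_nonoverlapping_pairs (password : String) : Int :=
  let l := password.toList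
  let pairs := (PySem.List.pyRange 0 ((l.length : Int) - 1) 1).foldl (pvA_step l) []
  if pairs = [] then 0
  else
    match PySem.List.sorted pairs (fun t => t.1) false with
    | [] => 0
    | p0 :: rest => ((rest.foldl pvA_greedyStep [p0]).length : Int)

-- ===== PORT B =====
-- run-length encoding loop; the Lean list keeps 'runs' reversed (head = Python's runs[-1])
def pvB_rleStep (runs : List (Char × Int)) (ch : Char) : List (Char × Int) :=
  match runs with
  | (c, n) :: t => if c = ch then (c, n + 1) :: t else (ch, 1) :: (c, n) :: t
  | [] => [(ch, 1)]

def get_count_of_nonoverlapping_pairs_alt (password : String) : Int :=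
  let runs := (password.toList.foldl pvB_rleStep []).reverse
  let letters := (runs.filter (fun r => 2 ≤ r.2)).map (fun r => r.1)
  (letters.foldl (fun (st : Int × Option Char) c => (if some c ≠ st.2 then st.1 + 1 else st.1, some c)) (0, none)).1

-- ===== PRECONDITION & SPEC =====
def Spec_get_count_of_nonoverlapping_pairs (password : String) (out : Int) : Prop := out = get_count_of_nonoverlapping_pairs_alt password
instance (password : String) (out : Int) : Decidable (Spec_get_count_of_nonoverlapping_pairs password out) := by unfold Spec_get_count_of_nonoverlapping_pairs; infer_instance

-- ===== CLAIM (what is proved, stated in full; the proofs are below) =====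
def Claim_equal_get_count_of_nonoverlapping_pairs : Prop := ∀ (password : String), Dom_get_count_of_nonoverlapping_pairs password → Spec_get_count_of_nonoverlapping_pairs password (get_count_of_nonoverlapping_pairs password)

-- ===== LEMMAS AND PROOFS =====

-- letters of the adjacent equal pairs of l, structurally
def pairLetters : List Char → List Char
  | a :: b :: rest => (if a = b then [a] else []) ++ pairLetters (b :: rest)
  | _ => []

-- count of cs after collapsing consecutive duplicates, with p = previously kept letter
def collapseC : Option Char → List Char → Nat
  | _, [] => 0
  | p, c :: cs => (if p = some c then 0 else 1) + collapseC (some c) cs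

-- A's pairs list from index k on, structurally
def pairsIdx (l : List Char) (k : Nat) : List (Int × Int × Char) :=
  if h : k + 1 < l.length then
    (if l[k]'(Nat.lt_of_succ_lt h) = l[k + 1]'h then
      [((k : Int), (k : Int) + 1, l[k]'(Nat.lt_of_succ_lt h))] else [])
      ++ pairsIdx l (k + 1)
  else []
termination_by l.length - k

-- structural run-length encoding (count as Int, as in the B port)
def rleS : List Char → List (Char × Int)
  | [] => []
  | a :: rest =>
    (a, 1 + ((rest.takeWhile (· == a)).length : Int)) :: rleS (rest.dropWhile (· == a))
termination_by l => l.length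
decreasing_by
  exact Nat.lt_succ_of_le (List.length_dropWhile_le _ _)

theorem pairsIdx_stop (l : List Char) (k : Nat) (h : ¬ k + 1 < l.length) : pairsIdx l k = [] := by
  rw [pairsIdx]; simp [h]

theorem pairsIdx_go (l : List Char) (k : Nat) (h : k + 1 < l.length) :
    pairsIdx l k = (if l[k]'(Nat.lt_of_succ_lt h) = l[k + 1]'h then
      [((k : Int), (k : Int) + 1, l[k]'(Nat.lt_of_succ_lt h))] else []) ++ pairsIdx l (k + 1) := by
  rw [pairsIdx]; simp [h]

-- A's index loop builds pairsIdx
theorem foldl_pvA_step (l : List Char) (k : Nat) (acc : List (Int × Int × Char)) :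
    (PySem.List.pyRange (k : Int) ((l.length : Int) - 1) 1).foldl (pvA_step l) acc
      = acc ++ pairsIdx l k := by
  by_cases h : k + 1 < l.length
  · have hk : (k : Int) < (l.length : Int) - 1 := by omega
    rw [PySem.List.pyRange_one_cons hk]
    have h1 : k < l.length := Nat.lt_of_succ_lt h
    have e1 : PySem.List.pyGetD l (k : Int) ' ' = l[k]'h1 := by
      rw [PySem.List.pyGetD_natCast]; exact List.getD_eq_getElem _ _ h1
    have e2 : PySem.List.pyGetD l ((k : Int) + 1) ' ' = l[k + 1]'h := by
      have : ((k : Int) + 1) = ((k + 1 : Nat) : Int) := by push_cast; ring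
      rw [this, PySem.List.pyGetD_natCast]; exact List.getD_eq_getElem _ _ h
    have step : pvA_step l acc (k : Int)
        = acc ++ (if l[k]'h1 = l[k + 1]'h then
            [((k : Int), (k : Int) + 1, l[k]'h1)] else []) := by
      unfold pvA_step
      rw [e1, e2]
      split_ifs <;> simp
    have : ((k : Int) + 1) = ((k + 1 : Nat) : Int) := by push_cast; ring
    rw [List.foldl_cons, step, this, foldl_pvA_step l (k + 1), pairsIdx_go l k h,
      List.append_assoc]
    push_cast
    rfl
  · rw [pairsIdx_stop l k h, PySem.List.pyRange_one_eq_nil (by omega)]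
    simp
termination_by l.length - k

-- every pair of pairsIdx l k has first index ≥ k and shape (i, i+1, ·)
theorem pairsIdx_mem (l : List Char) (k : Nat) :
    ∀ p ∈ pairsIdx l k, (k : Int) ≤ p.1 ∧ p.2.1 = p.1 + 1 := by
  intro p hp
  by_cases h : k + 1 < l.length
  · rw [pairsIdx_go l k h] at hp
    rcases List.mem_append.1 hp with hp | hp
    · constructor
      · split_ifs at hp <;> simp at hp
        rw [hp]
      · split_ifs at hp <;> simp at hp
        rw [hp]
    · have := pairsIdx_mem l (k + 1) p hp
      refine ⟨?_, this.2⟩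
      have h1 := this.1
      push_cast at h1 ⊢
      omega
  · rw [pairsIdx_stop l k h] at hp
    simp at hp
termination_by l.length - k

theorem pairsIdx_pairwise (l : List Char) (k : Nat) :
    (pairsIdx l k).Pairwise (fun p q => p.1 < q.1) := by
  by_cases h : k + 1 < l.length
  · rw [pairsIdx_go l k h]
    refine List.pairwise_append.2 ⟨?_, pairsIdx_pairwise l (k + 1), ?_⟩
    · split_ifs <;> simp
    · intro p hp q hq
      have hq1 := (pairsIdx_mem l (k + 1) q hq).1
      have hp1 : p.1 = (k : Int) := by
        split_ifs at hp <;> simp at hp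
        rw [hp]
      push_cast at hq1
      omega
  · rw [pairsIdx_stop l k h]; exact List.Pairwise.nil
termination_by l.length - k

theorem pairsIdx_letters (l : List Char) (k : Nat) :
    (pairsIdx l k).map (fun p => p.2.2) = pairLetters (l.drop k) := by
  by_cases h : k + 1 < l.length
  · have h1 : k < l.length := Nat.lt_of_succ_lt h
    rw [pairsIdx_go l k h, List.map_append,
      List.drop_eq_getElem_cons h1, List.drop_eq_getElem_cons h]
    rw [show pairLetters (l[k] :: l[k + 1] :: l.drop (k + 1 + 1))
        = (if l[k] = l[k + 1] then [l[k]] else []) ++ pairLetters (l[k + 1] :: l.drop (k + 1 + 1))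
      from rfl]
    rw [← List.drop_eq_getElem_cons h, pairsIdx_letters l (k + 1)]
    split_ifs <;> simp
  · rw [pairsIdx_stop l k h]
    rcases Nat.lt_or_ge k l.length with h1 | h1
    · have : l.drop k = [l[k]'h1] := by
        rw [List.drop_eq_getElem_cons h1]
        have : l.drop (k + 1) = [] := List.drop_eq_nil_of_le (by omega)
        rw [this]
      rw [this]; rfl
    · rw [List.drop_eq_nil_of_le h1]; rfl
termination_by l.length - k

-- the greedy loop counts letters collapsed against the last accepted letter
theorem greedy_count (ps : List (Int × Int × Char)) :
    ∀ (q : Int × Int × Char) (acc : List (Int × Int × Char)),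
    q.2.1 = q.1 + 1 → (∀ p ∈ ps, q.1 < p.1 ∧ p.2.1 = p.1 + 1) →
    ps.Pairwise (fun p p' => p.1 < p'.1) →
    (ps.foldl pvA_greedyStep (q :: acc)).length
      = (q :: acc).length + collapseC (some q.2.2) (ps.map (fun p => p.2.2)) := by
  induction ps with
  | nil => intro q acc _ _ _; rfl
  | cons p ps ih =>
    intro q acc hq hmem hpw
    have hqp : q.1 < p.1 := (hmem p (List.mem_cons_self)).1
    have hp : p.2.1 = p.1 + 1 := (hmem p (List.mem_cons_self)).2
    have hnov : ¬ p.1 < q.2.1 := by rw [hq]; omega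
    rw [List.foldl_cons]
    rw [show pvA_greedyStep (q :: acc) p
        = if p.1 < q.2.1 then q :: acc else if q.2.2 = p.2.2 then q :: acc else p :: q :: acc
      from rfl]
    rw [if_neg hnov]
    by_cases hc : q.2.2 = p.2.2
    · rw [if_pos hc]
      rw [ih q acc hq (fun r hr => hmem r (List.mem_cons_of_mem _ hr)) hpw.of_cons]
      simp [collapseC, hc]
    · rw [if_neg hc]
      have hmem' : ∀ r ∈ ps, p.1 < r.1 ∧ r.2.1 = r.1 + 1 :=
        fun r hr => ⟨(List.pairwise_cons.1 hpw).1 r hr, (hmem r (List.mem_cons_of_mem _ hr)).2⟩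
      rw [ih p (q :: acc) hp hmem' hpw.of_cons]
      have : (some q.2.2 = some p.2.2) = False := by simp [hc]
      simp [collapseC, this]
      omega

-- A computes the collapsed count of the pair letters
theorem A_val (password : String) :
    get_count_of_nonoverlapping_pairs password
      = (collapseC none (pairLetters password.toList) : Int) := by
  simp only [get_count_of_nonoverlapping_pairs]
  rw [show (0 : Int) = ((0 : Nat) : Int) from rfl, foldl_pvA_step password.toList 0 [],
    List.nil_append]
  have hlet := pairsIdx_letters password.toList 0
  rw [List.drop_zero] at hlet
  have hpw := pairsIdx_pairwise password.toList 0
  have hsorted : PySem.List.sorted (pairsIdx password.toList 0) (fun t => t.1) false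
      = pairsIdx password.toList 0 :=
    PySem.List.sorted_eq_self_of_pairwise _ _ (hpw.imp (fun h => le_of_lt h))
  rcases hps : pairsIdx password.toList 0 with _ | ⟨p0, rest⟩
  · rw [hps] at hlet
    simp at hlet
    rw [hlet]
    rfl
  · rw [hps] at hsorted hlet hpw
    rw [if_neg (by simp), hsorted]
    dsimp only
    have hmem := pairsIdx_mem password.toList 0
    rw [hps] at hmem
    have hrest : ∀ p ∈ rest, p0.1 < p.1 ∧ p.2.1 = p.1 + 1 :=
      fun p hp => ⟨(List.pairwise_cons.1 hpw).1 p hp,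
        (hmem p (List.mem_cons_of_mem _ hp)).2⟩
    rw [greedy_count rest p0 [] (hmem p0 List.mem_cons_self).2 hrest hpw.of_cons]
    rw [← hlet]
    simp [collapseC]

-- merging a block of equal characters into the current run
theorem rle_merge (j : Nat) (a : Char) :
    ∀ (m : Int) (t : List (Char × Int)) (rest : List Char),
    (List.replicate j a ++ rest).foldl pvB_rleStep ((a, m) :: t)
      = rest.foldl pvB_rleStep ((a, m + (j : Int)) :: t) := by
  induction j with
  | zero => intro m t rest; simp
  | succ j ih =>
    intro m t rest
    rw [List.replicate_succ, List.cons_append, List.foldl_cons]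
    rw [show pvB_rleStep ((a, m) :: t) a = (a, m + 1) :: t from by simp [pvB_rleStep]]
    rw [ih (m + 1) t rest]
    have : m + 1 + (j : Int) = m + ((j + 1 : Nat) : Int) := by push_cast; ring
    rw [this]

theorem takeWhile_eq_replicate (a : Char) (l : List Char) :
    l.takeWhile (· == a) = List.replicate (l.takeWhile (· == a)).length a := by
  apply List.eq_replicate_of_mem
  intro b hb
  have := List.mem_takeWhile_imp hb
  simpa using this

theorem head?_dropWhile_ne (a : Char) (l : List Char) :
    ∀ c ∈ (l.dropWhile (· == a)).head?, c ≠ a := by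
  induction l with
  | nil => intro c hc; simp at hc
  | cons b l ih =>
    intro c hc
    by_cases hb : b = a
    · rw [List.dropWhile_cons_of_pos (by simp [hb])] at hc
      exact ih c hc
    · rw [List.dropWhile_cons_of_neg (by simp [hb])] at hc
      simp at hc
      exact hc ▸ hb

-- the rle fold computes the structural run-length encoding
theorem rle_fold (l : List Char) (t : List (Char × Int))
    (ht : ∀ r ∈ t.head?, ∀ c ∈ l.head?, r.1 ≠ c) :
    l.foldl pvB_rleStep t = (rleS l).reverse ++ t := by
  match l with
  | [] => simp [rleS]
  | a :: rest =>
    have hdr : (rest.dropWhile (· == a)).length < (a :: rest).length :=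
      Nat.lt_succ_of_le (List.length_dropWhile_le _ _)
    have hstep : pvB_rleStep t a = (a, 1) :: t := by
      match t with
      | [] => rfl
      | (c, n) :: t' =>
        have : c ≠ a := ht (c, n) (by simp) a (by simp)
        simp [pvB_rleStep, this]
    rw [List.foldl_cons, hstep]
    have hrest : rest = List.replicate (rest.takeWhile (· == a)).length a
        ++ rest.dropWhile (· == a) := by
      conv_lhs => rw [← List.takeWhile_append_dropWhile (p := (· == a)) (l := rest)]
      rw [← takeWhile_eq_replicate]
    conv_lhs => rw [hrest]
    rw [rle_merge, rle_fold (rest.dropWhile (· == a))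
      ((a, 1 + ((rest.takeWhile (· == a)).length : Int)) :: t)
      (by
        intro r hr c hc
        simp at hr
        subst hr
        exact (head?_dropWhile_ne a rest c hc).symm)]
    rw [show rleS (a :: rest)
        = (a, 1 + ((rest.takeWhile (· == a)).length : Int)) :: rleS (rest.dropWhile (· == a))
      from by rw [rleS]]
    rw [List.reverse_cons, List.append_assoc, List.singleton_append]
termination_by l.length
decreasing_by exact hdr

-- count loop = collapseC
theorem count_fold (cs : List Char) :
    ∀ (p : Option Char) (acc : Int),
    (cs.foldl (fun (st : Int × Option Char) c => (if some c ≠ st.2 then st.1 + 1 else st.1, some c)) (acc, p)).1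
      = acc + (collapseC p cs : Int) := by
  induction cs with
  | nil => intro p acc; simp [collapseC]
  | cons c cs ih =>
    intro p acc
    rw [List.foldl_cons]
    by_cases h : p = some c
    · simp only [h]
      rw [show (if some c ≠ some c then acc + 1 else acc) = acc from by simp]
      rw [ih (some c) acc]
      simp [collapseC]
    · have hne : some c ≠ p := fun he => h he.symm
      simp only [if_pos hne]
      rw [ih (some c) (acc + 1)]
      simp [collapseC, h]
      omega

-- collapsing a replicate block
theorem collapseC_replicate (n : Nat) (hn : 1 ≤ n) (a : Char) (p : Option Char) (xs : List Char) :
    collapseC p (List.replicate n a ++ xs)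
      = (if p = some a then 0 else 1) + collapseC (some a) xs := by
  induction n generalizing p with
  | zero => omega
  | succ n ih =>
    rcases Nat.eq_zero_or_pos n with h | h
    · subst h; simp [collapseC]
    · rw [List.replicate_succ, List.cons_append]
      rw [show collapseC p (a :: (List.replicate n a ++ xs))
          = (if p = some a then 0 else 1) + collapseC (some a) (List.replicate n a ++ xs)
        from rfl]
      rw [ih h (some a)]
      simp

-- pair letters of a maximal block
theorem pairLetters_block (n : Nat) (a : Char) :
    ∀ (xs : List Char), (∀ c ∈ xs.head?, c ≠ a) →
    pairLetters (List.replicate (n + 1) a ++ xs) = List.replicate n a ++ pairLetters xs := by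
  induction n with
  | zero =>
    intro xs hxs
    match xs with
    | [] => rfl
    | b :: xs' =>
      have : a ≠ b := fun h => hxs b (by simp) h.symm
      simp [pairLetters, this]
  | succ n ih =>
    intro xs hxs
    rw [List.replicate_succ, List.cons_append]
    have h2 : List.replicate (n + 1) a ++ xs = a :: (List.replicate n a ++ xs) := by
      rw [List.replicate_succ, List.cons_append]
    rw [h2]
    rw [show pairLetters (a :: a :: (List.replicate n a ++ xs))
        = (if a = a then [a] else []) ++ pairLetters (a :: (List.replicate n a ++ xs)) from rfl]
    rw [if_pos rfl, ← h2, ih xs hxs]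
    rw [List.replicate_succ, List.cons_append]
    rfl

-- the bridge: collapsed pair letters = collapsed run letters (runs of length ≥ 2)
theorem bridge (l : List Char) (p : Option Char) :
    collapseC p (pairLetters l)
      = collapseC p (((rleS l).filter (fun r => 2 ≤ r.2)).map (fun r => r.1)) := by
  match l with
  | [] => simp [rleS, pairLetters]
  | a :: rest =>
    have hdr : (rest.dropWhile (· == a)).length < (a :: rest).length :=
      Nat.lt_succ_of_le (List.length_dropWhile_le _ _)
    have hsplit : a :: rest
        = List.replicate ((rest.takeWhile (· == a)).length + 1) a ++ rest.dropWhile (· == a) := by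
      rw [List.replicate_succ, List.cons_append, ← takeWhile_eq_replicate,
        List.takeWhile_append_dropWhile]
    have hL : pairLetters (a :: rest)
        = List.replicate (rest.takeWhile (· == a)).length a
          ++ pairLetters (rest.dropWhile (· == a)) := by
      have := pairLetters_block (rest.takeWhile (· == a)).length a
        (rest.dropWhile (· == a)) (head?_dropWhile_ne a rest)
      rw [← hsplit] at this
      exact this
    rw [hL]
    rw [show rleS (a :: rest)
        = (a, 1 + ((rest.takeWhile (· == a)).length : Int)) :: rleS (rest.dropWhile (· == a))
      from by rw [rleS]]
    by_cases htw : (rest.takeWhile (· == a)).length = 0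
    · rw [htw]
      rw [show ((1 : Int) + ((0 : Nat) : Int)) = 1 from by norm_num]
      rw [List.filter_cons_of_neg (by norm_num)]
      simp only [List.replicate_zero, List.nil_append]
      exact bridge (rest.dropWhile (· == a)) p
    · have htw1 : 1 ≤ (rest.takeWhile (· == a)).length := by omega
      rw [collapseC_replicate _ htw1]
      rw [List.filter_cons_of_pos (by
        simp only [decide_eq_true_eq]
        omega)]
      rw [List.map_cons]
      rw [show collapseC p (a :: ((rleS (rest.dropWhile (· == a))).filter
            (fun r => 2 ≤ r.2)).map (fun r => r.1))
          = (if p = some a then 0 else 1) + collapseC (some a)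
            (((rleS (rest.dropWhile (· == a))).filter (fun r => 2 ≤ r.2)).map (fun r => r.1))
        from rfl]
      rw [bridge (rest.dropWhile (· == a)) (some a)]
termination_by l.length
decreasing_by all_goals exact hdr

-- B computes the collapsed count of the run letters
theorem B_val (password : String) :
    get_count_of_nonoverlapping_pairs_alt password
      = (collapseC none (((rleS password.toList).filter (fun r => 2 ≤ r.2)).map (fun r => r.1)) : Int) := by
  unfold get_count_of_nonoverlapping_pairs_alt
  rw [rle_fold password.toList [] (by simp)]
  rw [List.append_nil, List.reverse_reverse]
  rw [count_fold]
  simp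

-- ===== VERDICT (by name: the statement is the Claim_ definition above) =====
theorem get_count_of_nonoverlapping_pairs_spec : Claim_equal_get_count_of_nonoverlapping_pairs := by
  intro password _
  unfold Spec_get_count_of_nonoverlapping_pairs
  rw [A_val, B_val, bridge]
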